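-- pv_equiv track=rewrite | github.com/ReformedDevs/fraqbot-2 | app/modules/memes.py | string_replace
-- ===== SOURCE A (Python) =====
-- def string_replace(text):
--     replacements = {
--         '_': '__',
--         '-': '--',
--         ' ': '_',
--         '?': '~q',
--         '%': '~p',
--         '#': '~h',
--         '/': '~s',
--         '"': "''",
--         '‘': "'",
--         '’': "'",
--         '“': "''",
--         '”': "''"
--     }
--
--     for srch, repl in replacements.items():
--         text = text.replace(srch, repl)
--
--     return text.strip()
-- ===== SOURCE B (Python) =====
-- def string_replace(text):
--     table = {
--         '_': '__',
--         '-': '--',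
--         ' ': '_',
--         '?': '~q',
--         '%': '~p',
--         '#': '~h',
--         '/': '~s',
--         '"': "''",
--         '\u2018': "'",
--         '\u2019': "'",
--         '\u201c': "''",
--         '\u201d': "''",
--     }
--     return ''.join(table.get(ch, ch) for ch in text).strip()
-- ===== Notes on version B (the rewrite author's own statement) =====
-- stated objective: alternative
-- what changed: Replaces the 12 sequential full-string replace passes by a single pass that maps each character through one lookup table and joins, then strips; correct because no replacement value triggers a later replacement key.
import Mathlib
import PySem

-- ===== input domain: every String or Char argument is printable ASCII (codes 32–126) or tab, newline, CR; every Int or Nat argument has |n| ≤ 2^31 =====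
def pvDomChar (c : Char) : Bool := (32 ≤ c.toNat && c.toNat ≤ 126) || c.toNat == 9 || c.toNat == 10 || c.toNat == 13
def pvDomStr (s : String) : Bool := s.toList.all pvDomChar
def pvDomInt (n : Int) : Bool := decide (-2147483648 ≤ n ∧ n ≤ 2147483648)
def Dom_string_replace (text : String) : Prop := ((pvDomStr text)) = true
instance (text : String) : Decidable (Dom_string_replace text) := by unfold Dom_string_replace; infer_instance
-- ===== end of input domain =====

-- B replaces A's 12 sequential whole-string replace passes by one pass through a
-- per-character lookup table (same return value; neither version mutates anything).

-- ===== PORT A =====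
def string_replace (text : String) : String :=
  let replacements : List (String × String) :=
    [("_", "__"), ("-", "--"), (" ", "_"), ("?", "~q"), ("%", "~p"), ("#", "~h"),
     ("/", "~s"), ("\"", "''"), ("‘", "'"), ("’", "'"), ("“", "''"), ("”", "''")]
  let text := replacements.foldl (fun t p => PySem.Str.replace t p.1 p.2) text
  PySem.Str.strip text

-- ===== PORT B =====
def pvTableB : PySem.Dict Char String :=
  PySem.Dict.ofList
    [('_', "__"), ('-', "--"), (' ', "_"), ('?', "~q"), ('%', "~p"), ('#', "~h"),
     ('/', "~s"), ('"', "''"), ('‘', "'"), ('’', "'"), ('“', "''"), ('”', "''")]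

def string_replace_alt (text : String) : String :=
  PySem.Str.strip (String.ofList (text.toList.flatMap
    (fun c => (PySem.Dict.getD pvTableB c (String.ofList [c])).toList)))

-- ===== PRECONDITION & SPEC =====
def Spec_string_replace (text : String) (out : String) : Prop := out = string_replace_alt text
instance (text : String) (out : String) : Decidable (Spec_string_replace text out) := by unfold Spec_string_replace; infer_instance

-- ===== CLAIM (what is proved, stated in full; the proofs are below) =====
def Claim_equal_string_replace : Prop := ∀ (text : String), Dom_string_replace text → Spec_string_replace text (string_replace text)

-- ===== LEMMAS AND PROOFS =====

/-- The worker of `PySem.Chars.replace` for a single-character pattern is a per-character flatMap. -/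
lemma go_one (c : Char) (r : List Char) :
    ∀ (l : List Char) (fuel : Nat) (acc : List Char), l.length ≤ fuel →
      PySem.Chars.replace.go [c] r fuel l acc
        = acc.reverse ++ l.flatMap (fun x => if x = c then r else [x]) := by
  intro l
  induction l with
  | nil =>
    intro fuel acc _
    cases fuel <;> simp [PySem.Chars.replace.go]
  | cons x t ih =>
    intro fuel acc h
    cases fuel with
    | zero => simp at h
    | succ f =>
      simp only [PySem.Chars.replace.go]
      by_cases hx : x = c
      · subst hx
        simp [List.isPrefixOf, ih f _ (by simpa using h)]
      · simp [List.isPrefixOf, (by simpa using Ne.symm hx : (c == x) = false),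
              ih f _ (by simpa using h), hx]

/-- Replacing a single-character pattern is a per-character flatMap. -/
lemma replace_one (s : List Char) (c : Char) (r : List Char) :
    PySem.Chars.replace s [c] r = s.flatMap (fun x => if x = c then r else [x]) := by
  simp [PySem.Chars.replace, go_one c r s s.length [] (le_refl _)]

set_option maxHeartbeats 1000000 in
/-- A's 12 sequential single-character replace passes collapse to B's one-pass table lookup. -/
lemma chain_eq (cs : List Char) :
    PySem.Chars.replace (PySem.Chars.replace (PySem.Chars.replace (PySem.Chars.replace
      (PySem.Chars.replace (PySem.Chars.replace (PySem.Chars.replace (PySem.Chars.replace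
      (PySem.Chars.replace (PySem.Chars.replace (PySem.Chars.replace (PySem.Chars.replace
        cs "_".toList "__".toList) "-".toList "--".toList) " ".toList "_".toList)
        "?".toList "~q".toList) "%".toList "~p".toList) "#".toList "~h".toList)
        "/".toList "~s".toList) "\"".toList "''".toList) "‘".toList "'".toList)
        "’".toList "'".toList) "“".toList "''".toList) "”".toList "''".toList
      = cs.flatMap (fun c => (PySem.Dict.getD pvTableB c (String.ofList [c])).toList) := by
  simp only [(show ("_" : String).toList = ['_'] by decide),
    (show ("-" : String).toList = ['-'] by decide),
    (show (" " : String).toList = [' '] by decide),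
    (show ("?" : String).toList = ['?'] by decide),
    (show ("%" : String).toList = ['%'] by decide),
    (show ("#" : String).toList = ['#'] by decide),
    (show ("/" : String).toList = ['/'] by decide),
    (show ("\"" : String).toList = ['"'] by decide),
    (show ("‘" : String).toList = ['‘'] by decide),
    (show ("’" : String).toList = ['’'] by decide),
    (show ("“" : String).toList = ['“'] by decide),
    (show ("”" : String).toList = ['”'] by decide),
    replace_one]
  induction cs with
  | nil => rfl
  | cons x xs ih =>
    simp only [List.flatMap_cons, List.flatMap_append, ih]
    refine congrArg₂ (· ++ ·) ?_ rfl
    by_cases h1 : x = '_'; · subst h1; decide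
    by_cases h2 : x = '-'; · subst h2; decide
    by_cases h3 : x = ' '; · subst h3; decide
    by_cases h4 : x = '?'; · subst h4; decide
    by_cases h5 : x = '%'; · subst h5; decide
    by_cases h6 : x = '#'; · subst h6; decide
    by_cases h7 : x = '/'; · subst h7; decide
    by_cases h8 : x = '"'; · subst h8; decide
    by_cases h9 : x = '‘'; · subst h9; decide
    by_cases h10 : x = '’'; · subst h10; decide
    by_cases h11 : x = '“'; · subst h11; decide
    by_cases h12 : x = '”'; · subst h12; decide
    have hitems : pvTableB.items =
        [('_', "__"), ('-', "--"), (' ', "_"), ('?', "~q"), ('%', "~p"), ('#', "~h"),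
         ('/', "~s"), ('"', "''"), ('‘', "'"), ('’', "'"), ('“', "''"), ('”', "''")] := by decide
    have e1 : ('_' == x) = false := by simp [Ne.symm h1]
    have e2 : ('-' == x) = false := by simp [Ne.symm h2]
    have e3 : (' ' == x) = false := by simp [Ne.symm h3]
    have e4 : ('?' == x) = false := by simp [Ne.symm h4]
    have e5 : ('%' == x) = false := by simp [Ne.symm h5]
    have e6 : ('#' == x) = false := by simp [Ne.symm h6]
    have e7 : ('/' == x) = false := by simp [Ne.symm h7]
    have e8 : ('\"' == x) = false := by simp [Ne.symm h8]
    have e9 : ('‘' == x) = false := by simp [Ne.symm h9]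
    have e10 : ('’' == x) = false := by simp [Ne.symm h10]
    have e11 : ('“' == x) = false := by simp [Ne.symm h11]
    have e12 : ('”' == x) = false := by simp [Ne.symm h12]
    simp [PySem.Dict.getD, PySem.Dict.get?, hitems, List.find?,
          e1, e2, e3, e4, e5, e6, e7, e8, e9, e10, e11, e12,
          h1, h2, h3, h4, h5, h6, h7, h8, h9, h10, h11, h12]

theorem string_replace_spec : Claim_equal_string_replace := by
  intro text _
  unfold Spec_string_replace string_replace string_replace_alt
  apply String.toList_inj.mp
  simp only [List.foldl, PySem.Str.toList_strip, PySem.Str.toList_replace, String.toList_ofList]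
  rw [chain_eq]
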